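-- pv_equiv track=rewrite | github.com/leila100/coding-exercises | codeSignal/companies/codeSignal/opponentMatching.py | opponentMatching
-- ===== SOURCE A (Python) =====
-- def opponentMatching(xp):
--     if len(xp) <= 1:
--         return []
--     # sort the xp list by keeping the index for each xp
--     xpSorted = sorted([(x, i) for i,x in enumerate(xp)], key= lambda x: x[0])
--     solution = []
--     # go through xpSorted, for each pair, find difference.
--     # Find smalest difference, add pair to solution, remove pair from xpSorted
--     # Do it again until xpSorted is empty or only one element
--     while len(xpSorted) > 1:
--         diff = None
--         pair = None
--         for i in range(len(xpSorted)-1):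
--             difference = xpSorted[i+1][0] - xpSorted[i][0]
--             if diff is None or difference < diff:
--                 diff = difference
--                 pair = [i, i+1]
--         sortedPair = [xpSorted[pair[0]][1], xpSorted[pair[1]][1]]
--         sortedPair.sort()
--         solution.append(sortedPair)
--         xpSorted.pop(pair[1])
--         xpSorted.pop(pair[0])
--     return solution
-- ===== SOURCE B (Python) =====
-- def _insort(events, e, lo):
--     # binary insertion of e into the ascending list events[lo:]
--     hi = len(events)
--     while lo < hi:
--         mid = (lo + hi) // 2
--         if events[mid] < e:
--             lo = mid + 1
--         else:
--             hi = mid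
--     events.insert(lo, e)
--
--
-- def opponentMatching(xp):
--     n = len(xp)
--     if n <= 1:
--         return []
--     xpSorted = sorted([(x, i) for i, x in enumerate(xp)], key=lambda p: p[0])
--     vals = [p[0] for p in xpSorted]
--     idx = [p[1] for p in xpSorted]
--     prv = [j - 1 for j in range(n)]
--     nxt = [j + 1 for j in range(n)]
--     alive = [True] * n
--     # ascending event queue of adjacent gaps (gap, left, right); stale entries
--     # are skipped lazily (live iff both endpoints alive and still adjacent)
--     events = []
--     for j in range(n - 1):
--         _insort(events, (vals[j + 1] - vals[j], j, j + 1), 0)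
--     solution = []
--     k = 0
--     while k < len(events):
--         d, l, r = events[k]
--         k += 1
--         if alive[l] and alive[r] and nxt[l] == r:
--             pair = [idx[l], idx[r]]
--             pair.sort()
--             solution.append(pair)
--             alive[l] = False
--             alive[r] = False
--             p = prv[l]
--             q = nxt[r]
--             if p >= 0:
--                 nxt[p] = q
--             if q < n:
--                 prv[q] = p
--             if p >= 0 and q < n:
--                 _insort(events, (vals[q] - vals[p], p, q), k)
--     return solution
-- ===== Notes on version B (the rewrite author's own statement) =====
-- stated objective: faster
-- what changed: Instead of rescanning all adjacent gaps and popping from the pair list every round (A), B sorts the xp once, keeps the survivors in a doubly-linked list over the sorted positions, and drains a sorted event queue of gaps with lazy deletion of stale entries, binary-inserting the single merged gap created by each match.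
import Mathlib
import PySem

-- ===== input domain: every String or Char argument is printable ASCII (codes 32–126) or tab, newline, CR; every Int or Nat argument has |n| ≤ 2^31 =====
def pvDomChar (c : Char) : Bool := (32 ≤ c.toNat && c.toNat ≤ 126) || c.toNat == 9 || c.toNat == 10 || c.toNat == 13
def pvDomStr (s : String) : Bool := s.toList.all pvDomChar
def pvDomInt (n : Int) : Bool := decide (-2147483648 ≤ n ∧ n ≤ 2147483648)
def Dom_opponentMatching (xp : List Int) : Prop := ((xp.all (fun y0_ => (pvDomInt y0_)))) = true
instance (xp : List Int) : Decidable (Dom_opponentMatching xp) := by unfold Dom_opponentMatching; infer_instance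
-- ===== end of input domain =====

-- B replaces A's per-round rescan of all adjacent gaps by a sorted event queue of
-- gaps with lazy deletion over a doubly-linked list of the sorted xp (faster by the
-- measured constant-factor mechanism stated in the claim); return values are equal.

-- ===== PORT A =====
-- A's inner 'for i in range(len(xpSorted)-1)' argmin scan (diff/pair start as None)
def scanA (xs : List (Int × Int)) : Option Int × Option (Int × Int) :=
  (PySem.List.pyRange 0 ((xs.length : Int) - 1) 1).foldl
    (fun st i =>
      let difference := (PySem.List.pyGetD xs (i + 1) (0, 0)).1 - (PySem.List.pyGetD xs i (0, 0)).1
      match st.1 with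
      | none => (some difference, some (i, i + 1))
      | some diff => if difference < diff then (some difference, some (i, i + 1)) else st)
    (none, none)

-- A's 'while len(xpSorted) > 1' loop (the unreachable 'none' arms of the two pops
-- and of the scan result only totalise the recursion; Python never takes them)
def loopA (xpSorted : List (Int × Int)) (solution : List (List Int)) : List (List Int) :=
  if h : 1 < xpSorted.length then
    match (scanA xpSorted).2 with
    | none => solution
    | some (i, j) =>
      let sortedPair := PySem.List.sorted
        [(PySem.List.pyGetD xpSorted i (0, 0)).2, (PySem.List.pyGetD xpSorted j (0, 0)).2]
        (fun x => x) false
      match hp1 : PySem.List.pop? xpSorted j with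
      | none => solution
      | some r1 =>
        match hp2 : PySem.List.pop? r1.2 i with
        | none => solution ++ [sortedPair]
        | some r2 => loopA r2.2 (solution ++ [sortedPair])
  else solution
termination_by xpSorted.length
decreasing_by
  have h1 := PySem.List.length_of_pop?_eq_some _ hp1
  have h2 := PySem.List.length_of_pop?_eq_some _ hp2
  omega

def opponentMatching (xp : List Int) : List (List Int) :=
  if xp.length ≤ 1 then []
  else
    let xpSorted := PySem.List.sorted ((PySem.List.enumerate xp 0).map (fun p => (p.2, p.1)))
      (fun t => t.1) false
    loopA xpSorted []

-- ===== PORT B =====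
-- B-side helpers: Python tuple comparison on the (gap, left, right) event triples
def lexLt (a b : Int × Int × Int) : Bool :=
  decide (a.1 < b.1) || (a.1 == b.1 && (decide (a.2.1 < b.2.1) ||
    (a.2.1 == b.2.1 && decide (a.2.2 < b.2.2))))

-- the 'while lo < hi' binary search inside _insort
def bsearchB (events : List (Int × Int × Int)) (e : Int × Int × Int) (lo hi : Nat) : Nat :=
  if lo < hi then
    let mid := (lo + hi) / 2
    if lexLt (events.getD mid e) e then bsearchB events e (mid + 1) hi
    else bsearchB events e lo mid
  else lo
termination_by hi - lo
decreasing_by all_goals omega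

-- _insort; the Lean state carries the still-unprocessed suffix events[k:] of the
-- Python events list, so Python's lo=k search is the lo=0 search on the suffix
def insortB (events : List (Int × Int × Int)) (e : Int × Int × Int) : List (Int × Int × Int) :=
  PySem.List.insert events ((bsearchB events e 0 events.length : Nat) : Int) e

-- termination helpers for loopB (cited in decreasing_by)
theorem pv_count_set_false_le (bs : List Bool) (j : Nat) :
    (bs.set j false).count true ≤ bs.count true := by
  by_cases hj : j < bs.length
  · rw [List.count_set hj]
    split <;> simp <;> omega
  · rw [List.set_eq_of_length_le (by omega)]

theorem pv_count_pySetD_false_le (bs : List Bool) (i : Int) :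
    (PySem.List.pySetD bs i false).count true ≤ bs.count true := by
  rcases hk : PySem.List.pyIdx? bs.length i with _ | k
  · simp [PySem.List.pySetD, PySem.List.pySet?, hk]
  · simp [PySem.List.pySetD, PySem.List.pySet?, hk]
    exact pv_count_set_false_le bs k

theorem pv_count_pySetD_false_lt (bs : List Bool) (i : Int)
    (h : PySem.List.pyGetD bs i false = true) :
    (PySem.List.pySetD bs i false).count true < bs.count true := by
  rcases hk : PySem.List.pyIdx? bs.length i with _ | k
  · simp [PySem.List.pyGetD, PySem.List.pyGet?, hk] at h
  · rcases hv : bs[k]? with _ | b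
    · simp [PySem.List.pyGetD, PySem.List.pyGet?, hk, hv] at h
    · have hkl : k < bs.length := by
        have := List.getElem?_eq_some_iff.mp hv
        exact this.1
      have hbk : bs[k] = true := by
        simp [PySem.List.pyGetD, PySem.List.pyGet?, hk, hv] at h
        obtain ⟨_, he⟩ := List.getElem?_eq_some_iff.mp hv
        exact he.trans h
      have hpos : 0 < bs.count true := by
        rw [List.count_pos_iff]
        exact hbk ▸ List.getElem_mem hkl
      simp only [PySem.List.pySetD, PySem.List.pySet?, hk, Option.map_some, Option.getD_some]
      rw [List.count_set hkl, hbk]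
      norm_num
      exact List.count_pos_iff.mp hpos

-- B's 'while k < len(events)' drain loop
def loopB (vals idx : List Int) (n : Int) (pending : List (Int × Int × Int))
    (alive : List Bool) (prv nxt : List Int) (solution : List (List Int)) :
    List (List Int) :=
  match pending with
  | [] => solution
  | (_d, l, r) :: rest =>
    if hg : (PySem.List.pyGetD alive l false && PySem.List.pyGetD alive r false &&
        (PySem.List.pyGetD nxt l 0 == r)) = true then
      let pair := PySem.List.sorted [PySem.List.pyGetD idx l 0, PySem.List.pyGetD idx r 0]
        (fun x => x) false
      let solution' := solution ++ [pair]
      let alive' := PySem.List.pySetD (PySem.List.pySetD alive l false) r false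
      let p := PySem.List.pyGetD prv l 0
      let q := PySem.List.pyGetD nxt r 0
      let nxt' := if p ≥ 0 then PySem.List.pySetD nxt p q else nxt
      let prv' := if q < n then PySem.List.pySetD prv q p else prv
      let pending' := if p ≥ 0 ∧ q < n then
          insortB rest (PySem.List.pyGetD vals q 0 - PySem.List.pyGetD vals p 0, p, q)
        else rest
      loopB vals idx n pending' alive' prv' nxt' solution'
    else loopB vals idx n rest alive prv nxt solution
termination_by pending.length + 2 * alive.count true
decreasing_by
  · have hl : PySem.List.pyGetD alive l false = true := by
      simp only [Bool.and_eq_true] at hg; exact hg.1.1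
    have h1 : (PySem.List.pySetD alive l false).count true < alive.count true :=
      pv_count_pySetD_false_lt alive l hl
    have h2 : (PySem.List.pySetD (PySem.List.pySetD alive l false) r false).count true ≤
        (PySem.List.pySetD alive l false).count true := pv_count_pySetD_false_le _ r
    split
    · simp only [insortB, PySem.List.length_insert, List.length_cons]; omega
    · simp only [List.length_cons]; omega
  · simp only [List.length_cons]; omega

def opponentMatching_alt (xp : List Int) : List (List Int) :=
  let n := xp.length
  if n ≤ 1 then []
  else
    let xpSorted := PySem.List.sorted ((PySem.List.enumerate xp 0).map (fun p => (p.2, p.1)))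
      (fun t => t.1) false
    let vals := xpSorted.map (fun p => p.1)
    let idx := xpSorted.map (fun p => p.2)
    let prv := (PySem.List.pyRange 0 (n : Int) 1).map (fun j => j - 1)
    let nxt := (PySem.List.pyRange 0 (n : Int) 1).map (fun j => j + 1)
    let alive := PySem.List.pyRepeat [true] (n : Int)
    let events := (PySem.List.pyRange 0 ((n : Int) - 1) 1).foldl
      (fun ev j => insortB ev
        (PySem.List.pyGetD vals (j + 1) 0 - PySem.List.pyGetD vals j 0, j, j + 1)) []
    loopB vals idx (n : Int) events alive prv nxt []

-- ===== PRECONDITION & SPEC =====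
def Spec_opponentMatching (xp : List Int) (out : List (List Int)) : Prop := out = opponentMatching_alt xp
instance (xp : List Int) (out : List (List Int)) : Decidable (Spec_opponentMatching xp out) := by unfold Spec_opponentMatching; infer_instance

-- ===== CLAIM (what is proved, stated in full; the proofs are below) =====
def Claim_equal_opponentMatching : Prop := ∀ (xp : List Int), Dom_opponentMatching xp → Spec_opponentMatching xp (opponentMatching xp)

-- ===== LEMMAS AND PROOFS =====

-- ---- the lexicographic order Python uses on the event triples ----
def Lt3 (a b : Int × Int × Int) : Prop :=
  a.1 < b.1 ∨ (a.1 = b.1 ∧ (a.2.1 < b.2.1 ∨ (a.2.1 = b.2.1 ∧ a.2.2 < b.2.2)))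

def Le3 (a b : Int × Int × Int) : Prop := ¬ Lt3 b a

theorem lexLt_iff (a b : Int × Int × Int) : lexLt a b = true ↔ Lt3 a b := by
  obtain ⟨a1, a2, a3⟩ := a; obtain ⟨b1, b2, b3⟩ := b
  simp [lexLt, Lt3]

theorem Lt3_irrefl (a : Int × Int × Int) : ¬ Lt3 a a := by
  obtain ⟨a1, a2, a3⟩ := a; simp [Lt3]

theorem Le3_of_Lt3 {a b : Int × Int × Int} (h : Lt3 a b) : Le3 a b := by
  obtain ⟨a1, a2, a3⟩ := a; obtain ⟨b1, b2, b3⟩ := b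
  simp [Lt3, Le3] at *; omega

theorem Lt3_of_Le3_of_Lt3 {a b c : Int × Int × Int} (h1 : Le3 a b) (h2 : Lt3 b c) : Lt3 a c := by
  obtain ⟨a1, a2, a3⟩ := a; obtain ⟨b1, b2, b3⟩ := b; obtain ⟨c1, c2, c3⟩ := c
  simp [Lt3, Le3] at *; omega

-- ---- binary search / binary insertion ----
theorem bsearchB_spec (xs : List (Int × Int × Int)) (e : Int × Int × Int)
    (hs : xs.Pairwise Le3) :
    ∀ fuel lo hi, hi - lo ≤ fuel → lo ≤ hi → hi ≤ xs.length →
    (∀ j, j < lo → ∀ (hj : j < xs.length), Lt3 xs[j] e) →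
    (∀ j, hi ≤ j → ∀ (hj : j < xs.length), ¬ Lt3 xs[j] e) →
    bsearchB xs e lo hi ≤ xs.length ∧
      (∀ j (hj : j < xs.length),
        (j < bsearchB xs e lo hi → Lt3 xs[j] e) ∧ (bsearchB xs e lo hi ≤ j → ¬ Lt3 xs[j] e)) := by
  intro fuel
  induction fuel with
  | zero =>
    intro lo hi hf hlh hhl hlow hhigh
    have heq : lo = hi := by omega
    rw [bsearchB]
    simp only [heq, lt_irrefl, if_false]
    refine ⟨by omega, fun j hj => ⟨fun hlt => hlow j (by omega) hj, fun hge => hhigh j (by omega) hj⟩⟩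
  | succ fuel ih =>
    intro lo hi hf hlh hhl hlow hhigh
    rw [bsearchB]
    by_cases hcmp : lo < hi
    · simp only [hcmp, if_true]
      have hmidlt : (lo + hi) / 2 < hi := by omega
      have hmidge : lo ≤ (lo + hi) / 2 := by omega
      have hmidlen : (lo + hi) / 2 < xs.length := by omega
      have hgetD : xs.getD ((lo + hi) / 2) e = xs[(lo + hi) / 2] := by
        rw [List.getD_eq_getElem?_getD, List.getElem?_eq_getElem hmidlen, Option.getD_some]
      by_cases hc : lexLt (xs.getD ((lo + hi) / 2) e) e = true
      · simp only [hc, if_true]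
        have hmide : Lt3 xs[(lo + hi) / 2] e := by
          rw [hgetD] at hc; exact (lexLt_iff _ _).mp hc
        exact ih ((lo + hi) / 2 + 1) hi (by omega) (by omega) hhl
          (fun j hjlt hj => by
            rcases Nat.lt_or_ge j ((lo + hi) / 2) with hlt | hge
            · exact Lt3_of_Le3_of_Lt3
                (List.pairwise_iff_getElem.mp hs j ((lo + hi) / 2) hj hmidlen hlt) hmide
            · have : j = (lo + hi) / 2 := by omega
              subst this; exact hmide)
          hhigh
      · simp only [hc, Bool.false_eq_true, if_false]
        have hmide : ¬ Lt3 xs[(lo + hi) / 2] e := by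
          rw [hgetD] at hc
          intro hcon; exact hc ((lexLt_iff _ _).mpr hcon)
        exact ih lo ((lo + hi) / 2) (by omega) (by omega) (by omega) hlow
          (fun j hjge hj => by
            rcases Nat.lt_or_ge ((lo + hi) / 2) j with hlt | hge
            · intro hcon
              exact hmide (Lt3_of_Le3_of_Lt3
                (List.pairwise_iff_getElem.mp hs ((lo + hi) / 2) j hmidlen hj hlt) hcon)
            · have : j = (lo + hi) / 2 := by omega
              subst this; exact hmide)
    · simp only [hcmp, if_false]
      have heq : lo = hi := by omega
      refine ⟨by omega, fun j hj =>
        ⟨fun hlt => hlow j (by omega) hj, fun hge => hhigh j (by omega) hj⟩⟩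

theorem bsearchB_le (xs : List (Int × Int × Int)) (e : Int × Int × Int) :
    ∀ fuel lo hi, hi - lo ≤ fuel → lo ≤ hi → hi ≤ xs.length →
    lo ≤ bsearchB xs e lo hi ∧ bsearchB xs e lo hi ≤ hi := by
  intro fuel
  induction fuel with
  | zero =>
    intro lo hi hf hlh hhl
    rw [bsearchB]
    have : ¬ lo < hi := by omega
    simp only [this, if_false]
    omega
  | succ fuel ih =>
    intro lo hi hf hlh hhl
    rw [bsearchB]
    by_cases hcmp : lo < hi
    · simp only [hcmp, if_true]
      by_cases hc : lexLt (xs.getD ((lo + hi) / 2) e) e = true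
      · simp only [hc, if_true]
        have := ih ((lo + hi) / 2 + 1) hi (by omega) (by omega) hhl
        omega
      · simp only [hc, Bool.false_eq_true, if_false]
        have := ih lo ((lo + hi) / 2) (by omega) (by omega) (by omega)
        omega
    · simp only [hcmp, if_false]
      omega

theorem mem_insortB {x e : Int × Int × Int} {xs : List (Int × Int × Int)} :
    x ∈ insortB xs e ↔ x = e ∨ x ∈ xs := by
  have hple : bsearchB xs e 0 xs.length ≤ xs.length :=
    (bsearchB_le xs e xs.length 0 xs.length (by omega) (by omega) le_rfl).2
  rw [insortB, PySem.List.insert_natCast xs _ e hple]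
  rw [List.mem_append, List.mem_cons]
  conv_rhs => rw [← List.take_append_drop (bsearchB xs e 0 xs.length) xs]
  rw [List.mem_append]
  tauto

theorem pairwise_insortB {xs : List (Int × Int × Int)} (e : Int × Int × Int)
    (hs : xs.Pairwise Le3) : (insortB xs e).Pairwise Le3 := by
  obtain ⟨hple, hchar⟩ := bsearchB_spec xs e hs xs.length 0 xs.length (by omega) (by omega)
    le_rfl (fun j hj _ => absurd hj (Nat.not_lt_zero j)) (fun j hj hjl => by omega)
  set p := bsearchB xs e 0 xs.length with hp
  have hmemtake : ∀ x ∈ List.take p xs, Lt3 x e := by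
    intro x hx
    obtain ⟨j, hj, rfl⟩ := List.mem_iff_getElem.mp hx
    have hjp : j < p := by
      have := List.length_take (l := xs) (i := p); omega
    rw [List.getElem_take]
    exact (hchar j (by omega)).1 hjp
  have hmemdrop : ∀ y ∈ List.drop p xs, ¬ Lt3 y e := by
    intro y hy
    obtain ⟨k, hk, rfl⟩ := List.mem_iff_getElem.mp hy
    have hkl : p + k < xs.length := by
      have := List.length_drop (l := xs) (i := p); omega
    rw [List.getElem_drop]
    exact (hchar (p + k) hkl).2 (by omega)
  rw [insortB, PySem.List.insert_natCast xs _ e hple]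
  apply List.pairwise_append.mpr
  refine ⟨hs.sublist (List.take_sublist _ _), ?_, ?_⟩
  · apply List.pairwise_cons.mpr
    exact ⟨fun y hy => hmemdrop y hy, hs.sublist (List.drop_sublist _ _)⟩
  · intro x hx y hy
    rcases List.mem_cons.mp hy with rfl | hy'
    · exact Le3_of_Lt3 (hmemtake x hx)
    · -- x before the split, y after it: use pairwise of xs
      obtain ⟨j, hj, rfl⟩ := List.mem_iff_getElem.mp hx
      obtain ⟨k, hk, rfl⟩ := List.mem_iff_getElem.mp hy'
      have hjp : j < p := by
        have := List.length_take (l := xs) (i := p); omega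
      have hkl : p + k < xs.length := by
        have := List.length_drop (l := xs) (i := p); omega
      rw [List.getElem_take]
      rw [List.getElem_drop]
      exact List.pairwise_iff_getElem.mp hs j (p + k) (by omega) hkl (by omega)

-- ---- characterisation of A's argmin scan ----
def gapF (xs : List (Int × Int)) (t : Nat) : Int :=
  (xs.getD (t + 1) (0, 0)).1 - (xs.getD t (0, 0)).1

theorem scanA_fold (xs : List (Int × Int)) (m : Nat) (hm1 : 1 ≤ m) (hmle : m + 1 ≤ xs.length) :
    ∃ j : Nat, j < m ∧
      (PySem.List.pyRange 0 (m : Int) 1).foldl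
        (fun st i =>
          let difference := (PySem.List.pyGetD xs (i + 1) (0, 0)).1 -
            (PySem.List.pyGetD xs i (0, 0)).1
          match st.1 with
          | none => (some difference, some (i, i + 1))
          | some diff => if difference < diff then (some difference, some (i, i + 1)) else st)
        (none, none) = (some (gapF xs j), some ((j : Int), (j : Int) + 1)) ∧
      (∀ t, t < m → gapF xs j ≤ gapF xs t) ∧ (∀ t, t < j → gapF xs j < gapF xs t) := by
  induction m with
  | zero => omega
  | succ m ih =>
    by_cases hm0 : m = 0
    · subst hm0
      refine ⟨0, by omega, ?_, ?_, ?_⟩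
      · have h1 : ((1 : Nat) : Int) = 0 + 1 := by norm_num
        rw [h1, PySem.List.pyRange_one_succ_right (by norm_num), PySem.List.pyRange_one_eq_nil le_rfl]
        simp only [List.nil_append, List.foldl_cons, List.foldl_nil]
        have hc1 : ((0 : Int) + 1) = ((1 : Nat) : Int) := by norm_num
        rw [hc1, PySem.List.pyGetD_natCast]
        have hc0 : (0 : Int) = ((0 : Nat) : Int) := by norm_num
        rw [hc0, PySem.List.pyGetD_natCast]
        simp [gapF]
      · intro t ht; interval_cases t; exact le_rfl
      · intro t ht; omega
    · obtain ⟨j, hjm, hfold, hmin', hfirst'⟩ := ih (by omega) (by omega)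
      have hsucc : ((m + 1 : Nat) : Int) = (m : Int) + 1 := by push_cast; ring
      rw [hsucc, PySem.List.pyRange_one_succ_right (by positivity), List.foldl_append, hfold]
      simp only [List.foldl_cons, List.foldl_nil]
      have hcast1 : ((m : Int) + 1) = ((m + 1 : Nat) : Int) := by push_cast; ring
      rw [hcast1, PySem.List.pyGetD_natCast, PySem.List.pyGetD_natCast]
      show ∃ j', j' < m + 1 ∧
        (if (xs.getD (m+1) (0,0)).1 - (xs.getD m (0,0)).1 < gapF xs j then
          (some ((xs.getD (m+1) (0,0)).1 - (xs.getD m (0,0)).1), some ((m : Int), (m : Int) + 1))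
        else (some (gapF xs j), some ((j : Int), (j : Int) + 1))) =
          (some (gapF xs j'), some ((j' : Int), (j' : Int) + 1)) ∧ _ ∧ _
      by_cases hlt : gapF xs m < gapF xs j
      · refine ⟨m, by omega, ?_, ?_, ?_⟩
        · rw [if_pos (by simpa [gapF] using hlt)]
          simp [gapF]
        · intro t ht
          rcases Nat.lt_or_ge t m with h | h
          · exact le_of_lt (lt_of_lt_of_le hlt (hmin' t h))
          · have : t = m := by omega
            subst this; exact le_rfl
        · intro t ht
          exact lt_of_lt_of_le hlt (hmin' t ht)
      · refine ⟨j, by omega, ?_, ?_, ?_⟩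
        · rw [if_neg (by simpa [gapF] using hlt)]
        · intro t ht
          rcases Nat.lt_or_ge t m with h | h
          · exact hmin' t h
          · have : t = m := by omega
            subst this
            simp [gapF] at hlt ⊢
            omega
        · exact hfirst'

theorem scanA_eq (xs : List (Int × Int)) (i0 : Nat) (hi0 : i0 + 1 < xs.length)
    (hmin : ∀ t, t + 1 < xs.length → gapF xs i0 ≤ gapF xs t)
    (hfirst : ∀ t, t < i0 → gapF xs i0 < gapF xs t) :
    (scanA xs).2 = some ((i0 : Int), (i0 : Int) + 1) := by
  have hm1 : 1 ≤ xs.length - 1 := by omega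
  obtain ⟨j, hjm, hfold, hmin', hfirst'⟩ := scanA_fold xs (xs.length - 1) hm1 (by omega)
  have hji : j = i0 := by
    rcases Nat.lt_trichotomy j i0 with h | h | h
    · have h1 := hfirst j h
      have h2 := hmin' i0 (by omega)
      omega
    · exact h
    · have h1 := hfirst' i0 h
      have h2 := hmin j (by omega)
      omega
  subst hji
  rw [scanA]
  have hcast : ((xs.length : Int) - 1) = ((xs.length - 1 : Nat) : Int) := by omega
  rw [hcast, hfold]


-- ---- generic list helpers for removing the matched pair ----
theorem erase2_eq {α : Type} (P : List α) (i0 : Nat) (h : i0 + 1 < P.length) :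
    (P.eraseIdx (i0+1)).eraseIdx i0 = P.take i0 ++ P.drop (i0+2) := by
  rw [List.eraseIdx_eq_take_drop_succ, List.eraseIdx_eq_take_drop_succ]
  rw [List.take_append, List.drop_append]
  rw [List.take_take, List.length_take]
  have h1 : min i0 (i0+1) = i0 := by omega
  have h2 : min (i0+1) P.length = i0 + 1 := by omega
  rw [h1, h2]
  have h3 : i0 - (i0+1) = 0 := by omega
  have h4 : i0 + 1 - (i0 + 1) = 0 := by omega
  rw [h3, h4]
  simp only [List.take_zero, List.append_nil, List.drop_zero]
  congr 1
  rw [List.drop_take]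
  have : i0 + 1 ≤ P.length := by omega
  rw [List.drop_eq_getElem_cons (by omega : i0 + 1 < P.length)]
  simp

theorem getElem?_erase2 {α : Type} (P : List α) (i0 : Nat) (h : i0 + 1 < P.length) (j : Nat) :
    (P.take i0 ++ P.drop (i0+2))[j]? = if j < i0 then P[j]? else P[j+2]? := by
  have hlt : (List.take i0 P).length = i0 := by
    rw [List.length_take]; omega
  by_cases hj : j < i0
  · rw [List.getElem?_append_left (by omega), if_pos hj, List.getElem?_take]
    simp [hj]
  · rw [List.getElem?_append_right (by omega), if_neg hj, hlt, List.getElem?_drop]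
    congr 1
    omega

theorem decomp_P {α : Type} {P : List α} {i0 : Nat} {a b : α}
    (h0 : P[i0]? = some a) (h1 : P[i0+1]? = some b) :
    P = P.take i0 ++ a :: b :: P.drop (i0+2) := by
  have hi1 : i0 + 1 < P.length := (List.getElem?_eq_some_iff.mp h1).1
  have ha : P[i0] = a := by
    have := List.getElem?_eq_some_iff.mp h0
    exact this.2
  have hb : P[i0+1] = b := (List.getElem?_eq_some_iff.mp h1).2
  conv_lhs => rw [← List.take_append_drop i0 P]
  congr 1
  rw [List.drop_eq_getElem_cons (by omega : i0 < P.length), ha]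
  congr 1
  rw [List.drop_eq_getElem_cons hi1, hb]

-- ---- the simulation invariant ----
def fA (vals idx : List Int) (p : Nat) : Int × Int := (vals.getD p 0, idx.getD p 0)

def StInv (vals idx : List Int) (n : Nat) (pending : List (Int × Int × Int))
    (alive : List Bool) (prv nxt : List Int) (P : List Nat) : Prop :=
  alive.length = n ∧ prv.length = n ∧ nxt.length = n ∧
  P.Pairwise (· < ·) ∧ (∀ p ∈ P, p < n) ∧
  (∀ j : Nat, j < n → alive.getD j false = decide (j ∈ P)) ∧
  (∀ i a, P[i]? = some a → nxt.getD a 0 = (Option.map (fun b : Nat => (b : Int)) P[i+1]?).getD (n : Int)) ∧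
  (∀ i a, P[i]? = some a →
    prv.getD a 0 = if i = 0 then (-1 : Int) else (Option.map (fun b : Nat => (b : Int)) P[i-1]?).getD (-1)) ∧
  pending.Pairwise Le3 ∧
  (∀ e ∈ pending, ∃ a b : Nat,
    e = (vals.getD b 0 - vals.getD a 0, (a : Int), (b : Int)) ∧ a < b ∧ b < n) ∧
  (∀ i a b, P[i]? = some a → P[i+1]? = some b →
    (vals.getD b 0 - vals.getD a 0, (a : Int), (b : Int)) ∈ pending)

theorem loopA_short {xs : List (Int × Int)} (h : ¬ 1 < xs.length) (sol : List (List Int)) :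
    loopA xs sol = sol := by
  rw [loopA]; simp [h]


theorem getD_set_ne {α : Type} (L : List α) (u c : Nat) (v d : α) (h : c ≠ u) :
    (L.set u v).getD c d = L.getD c d := by
  rw [List.getD_eq_getElem?_getD, List.getElem?_set, if_neg (fun hh => h hh.symm),
    ← List.getD_eq_getElem?_getD]

theorem getD_set_self {α : Type} (L : List α) (u : Nat) (v d : α) (h : u < L.length) :
    (L.set u v).getD u d = v := by
  rw [List.getD_eq_getElem?_getD, List.getElem?_set, if_pos rfl, if_pos h, Option.getD_some]

-- one matched pair: the updated B-state satisfies the invariant for the shrunken P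
theorem step_inv (vals idx : List Int) (n : Nat) (rest : List (Int × Int × Int))
    (alive : List Bool) (prv nxt : List Int) (P : List Nat) (a b i0 : Nat) (p q : Int)
    (hinv : StInv vals idx n ((vals.getD b 0 - vals.getD a 0, (a : Int), (b : Int)) :: rest)
      alive prv nxt P)
    (hP0 : P[i0]? = some a) (hP1 : P[i0+1]? = some b)
    (hp : p = prv.getD a 0) (hq : q = nxt.getD b 0) :
    StInv vals idx n
      (if p ≥ 0 ∧ q < (n : Int) then
        insortB rest (PySem.List.pyGetD vals q 0 - PySem.List.pyGetD vals p 0, p, q)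
      else rest)
      (PySem.List.pySetD (PySem.List.pySetD alive (a : Int) false) (b : Int) false)
      (if q < (n : Int) then PySem.List.pySetD prv q p else prv)
      (if p ≥ 0 then PySem.List.pySetD nxt p q else nxt)
      (P.take i0 ++ P.drop (i0+2)) := by
  obtain ⟨hal, hpl, hnl, hmono, hPn, halive, hnxt, hprv, hpend, hshape, hcomp⟩ := hinv
  have hi1 : i0 + 1 < P.length := (List.getElem?_eq_some_iff.mp hP1).1
  have haP : P[i0] = a := (List.getElem?_eq_some_iff.mp hP0).2
  have hbP : P[i0+1] = b := (List.getElem?_eq_some_iff.mp hP1).2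
  have hmemA : a ∈ P := List.mem_iff_getElem?.mpr ⟨i0, hP0⟩
  have hmemB : b ∈ P := List.mem_iff_getElem?.mpr ⟨i0+1, hP1⟩
  have han : a < n := hPn a hmemA
  have hbn : b < n := hPn b hmemB
  have hPlt : ∀ (j k : Nat) (hj : j < P.length) (hk : k < P.length), j < k → P[j] < P[k] :=
    fun j k hj hk hjk => List.pairwise_iff_getElem.mp hmono j k hj hk hjk
  have hidx_inj : ∀ (j k c : Nat), P[j]? = some c → P[k]? = some c → j = k := by
    intro j k c hjc hkc
    obtain ⟨hjl, hjv⟩ := List.getElem?_eq_some_iff.mp hjc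
    obtain ⟨hkl, hkv⟩ := List.getElem?_eq_some_iff.mp hkc
    rcases Nat.lt_trichotomy j k with h | h | h
    · have := hPlt j k hjl hkl h; omega
    · exact h
    · have := hPlt k j hkl hjl h; omega
  have hget' := getElem?_erase2 P i0 hi1
  have hP'len : (P.take i0 ++ P.drop (i0+2)).length = P.length - 2 := by
    rw [List.length_append, List.length_take, List.length_drop]; omega
  have hdecomp := decomp_P hP0 hP1
  have hpge0 : (p ≥ 0) ↔ 0 < i0 := by
    rw [hp, hprv i0 a hP0]
    rcases Nat.eq_zero_or_pos i0 with h0 | h0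
    · simp [h0]
    · have : P[i0-1]? = some P[i0-1] := List.getElem?_eq_getElem (by omega)
      rw [if_neg (by omega), this]
      simp only [Option.map_some, Option.getD_some]
      constructor
      · intro _; exact h0
      · intro _; positivity
  have hpval : 0 < i0 → p = ((P[i0-1]'(by omega) : Nat) : Int) := by
    intro h0
    rw [hp, hprv i0 a hP0, if_neg (by omega), List.getElem?_eq_getElem (by omega : i0 - 1 < P.length)]
    simp
  have hqlt : (q < (n : Int)) ↔ i0 + 2 < P.length := by
    rw [hq, hnxt (i0+1) b hP1]
    rcases Nat.lt_or_ge (i0+2) P.length with h2 | h2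
    · rw [List.getElem?_eq_getElem h2]
      simp only [Option.map_some, Option.getD_some]
      have := hPn (P[i0+2]) (List.getElem_mem h2)
      constructor
      · intro _; exact h2
      · intro _; exact_mod_cast this
    · rw [List.getElem?_eq_none_iff.mpr (by omega)]
      simp only [Option.map_none, Option.getD_none]
      omega
  have hqval : ∀ (h2 : i0 + 2 < P.length), q = ((P[i0+2]'h2 : Nat) : Int) := by
    intro h2
    rw [hq, hnxt (i0+1) b hP1, List.getElem?_eq_getElem h2]
    simp
  have hqn : P.length ≤ i0 + 2 → q = (n : Int) := by
    intro h2
    rw [hq, hnxt (i0+1) b hP1, List.getElem?_eq_none_iff.mpr (by omega)]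
    simp
  have hsub : (P.take i0 ++ P.drop (i0+2)).Sublist P := by
    conv_rhs => rw [hdecomp]
    exact List.Sublist.append_left
      ((List.sublist_cons_self b _).trans (List.sublist_cons_self a _)) _
  have hnodup : P.Nodup := hmono.imp (fun h => Nat.ne_of_lt h)
  have hmem' : ∀ j : Nat, j ∈ P.take i0 ++ P.drop (i0+2) ↔ (j ∈ P ∧ j ≠ a ∧ j ≠ b) := by
    intro j
    constructor
    · intro hj
      obtain ⟨m, hm⟩ := List.mem_iff_getElem?.mp hj
      rw [hget' m] at hm
      by_cases hmlt : m < i0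
      · rw [if_pos hmlt] at hm
        refine ⟨List.mem_iff_getElem?.mpr ⟨m, hm⟩, ?_, ?_⟩
        · intro h; subst h; have := hidx_inj m i0 j hm hP0; omega
        · intro h; subst h; have := hidx_inj m (i0+1) j hm hP1; omega
      · rw [if_neg hmlt] at hm
        refine ⟨List.mem_iff_getElem?.mpr ⟨m+2, hm⟩, ?_, ?_⟩
        · intro h; subst h; have := hidx_inj (m+2) i0 j hm hP0; omega
        · intro h; subst h; have := hidx_inj (m+2) (i0+1) j hm hP1; omega
    · rintro ⟨hjP, hja, hjb⟩
      obtain ⟨k, hk⟩ := List.mem_iff_getElem?.mp hjP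
      have hki0 : k ≠ i0 := by
        intro h; subst h; rw [hP0] at hk; injection hk with h'; exact hja h'.symm
      have hki1 : k ≠ i0 + 1 := by
        intro h; subst h; rw [hP1] at hk; injection hk with h'; exact hjb h'.symm
      rcases Nat.lt_or_ge k i0 with hlt | hge
      · exact List.mem_iff_getElem?.mpr ⟨k, by rw [hget' k, if_pos hlt]; exact hk⟩
      · have hk2 : k - 2 + 2 = k := by omega
        refine List.mem_iff_getElem?.mpr ⟨k - 2, ?_⟩
        rw [hget' (k-2), if_neg (by omega), hk2]
        exact hk
  refine ⟨?_, ?_, ?_, hmono.sublist hsub, fun x hx => hPn x (hsub.mem hx), ?_, ?_, ?_, ?_, ?_, ?_⟩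
  · rw [PySem.List.length_pySetD, PySem.List.length_pySetD, hal]
  · split
    · rw [PySem.List.length_pySetD, hpl]
    · exact hpl
  · split
    · rw [PySem.List.length_pySetD, hnl]
    · exact hnl
  · -- alive
    intro j hj
    rw [PySem.List.pySetD_natCast, PySem.List.pySetD_natCast]
    rcases eq_or_ne j b with rfl | hjb
    · rw [getD_set_self _ _ _ _ (by rw [List.length_set, hal]; omega)]
      symm
      simp [hmem']
    · rw [getD_set_ne _ _ _ _ _ hjb]
      rcases eq_or_ne j a with rfl | hja
      · rw [getD_set_self _ _ _ _ (by rw [hal]; omega)]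
        symm
        simp [hmem']
      · rw [getD_set_ne _ _ _ _ _ hja, halive j hj]
        have hiff : (j ∈ P.take i0 ++ P.drop (i0+2)) ↔ j ∈ P := by
          rw [hmem']
          exact ⟨fun h => h.1, fun h => ⟨h, hja, hjb⟩⟩
        simp [hiff]
  · -- nxt links
    intro i c hc
    rw [hget' i] at hc
    rw [hget' (i+1)]
    by_cases hilt : i < i0
    · rw [if_pos hilt] at hc
      have h0 : 0 < i0 := by omega
      rw [if_pos (hpge0.mpr h0), hpval h0, PySem.List.pySetD_natCast]
      by_cases h1lt : i + 1 < i0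
      · rw [if_pos h1lt]
        have hca : c ≠ P[i0-1]'(by omega) := by
          intro h
          have h' : P[i0-1]? = some c := by
            rw [List.getElem?_eq_getElem (by omega : i0 - 1 < P.length), h]
          have := hidx_inj i (i0-1) c hc h'
          omega
        rw [getD_set_ne _ _ _ _ _ hca]
        exact hnxt i c hc
      · have hc' : P[i0-1]? = some c := by rw [show i0 - 1 = i from by omega]; exact hc
        have hceq : P[i0-1]'(by omega) = c := (List.getElem?_eq_some_iff.mp hc').2
        rw [hceq, if_neg h1lt, getD_set_self _ _ _ _ (by rw [hnl]; exact hPn c (List.mem_iff_getElem?.mpr ⟨i0-1, hc'⟩)), hq, hnxt (i0+1) b hP1]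
        rw [show i + 1 + 2 = i0 + 2 from by omega]
    · rw [if_neg hilt] at hc
      rw [if_neg (by omega : ¬ i + 1 < i0)]
      have hnc := hnxt (i+2) c hc
      have hcne : ∀ (h0 : 0 < i0), c ≠ P[i0-1]'(by omega) := by
        intro h0 h
        have h' : P[i0-1]? = some c := by
          rw [List.getElem?_eq_getElem (by omega : i0 - 1 < P.length), h]
        have := hidx_inj (i+2) (i0-1) c hc h'
        omega
      have hidxeq : i + 1 + 2 = i + 2 + 1 := by omega
      by_cases hp0 : p ≥ 0
      · have h0 := hpge0.mp hp0
        rw [if_pos hp0, hpval h0, PySem.List.pySetD_natCast, getD_set_ne _ _ _ _ _ (hcne h0),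
          hidxeq]
        exact hnc
      · rw [if_neg hp0, hidxeq]
        exact hnc
  · -- prv links
    intro i c hc
    rw [hget' i] at hc
    by_cases hilt : i < i0
    · rw [if_pos hilt] at hc
      have hcne : ∀ (h2 : i0 + 2 < P.length), c ≠ P[i0+2]'h2 := by
        intro h2 h
        have h' : P[i0+2]? = some c := by rw [List.getElem?_eq_getElem h2, h]
        have := hidx_inj i (i0+2) c hc h'
        omega
      have hlhs : (if q < (n : Int) then PySem.List.pySetD prv q p else prv).getD c 0 =
          prv.getD c 0 := by
        by_cases hq0 : q < (n : Int)
        · have h2 := hqlt.mp hq0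
          rw [if_pos hq0, hqval h2, PySem.List.pySetD_natCast,
            getD_set_ne _ _ _ _ _ (hcne h2)]
        · rw [if_neg hq0]
      rw [hlhs, hprv i c hc]
      by_cases hi00 : i = 0
      · rw [if_pos hi00, if_pos hi00]
      · rw [if_neg hi00, if_neg hi00, hget' (i-1), if_pos (by omega)]
    · rw [if_neg hilt] at hc
      rcases Nat.eq_or_lt_of_le (by omega : i0 ≤ i) with hieq | higt
      · -- i = i0 : c is the merged right neighbour P[i0+2]
        have hc0 : P[i0+2]? = some c := by rw [hieq]; exact hc
        have h2 : i0 + 2 < P.length := (List.getElem?_eq_some_iff.mp hc0).1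
        have hceq : P[i0+2]'h2 = c := (List.getElem?_eq_some_iff.mp hc0).2
        have hq0 : q < (n : Int) := hqlt.mpr h2
        rw [if_pos hq0, hqval h2, PySem.List.pySetD_natCast, hceq,
          getD_set_self _ _ _ _ (by rw [hpl]; exact hPn c (List.mem_iff_getElem?.mpr ⟨i0+2, hc0⟩))]
        by_cases hi00 : i = 0
        · rw [if_pos hi00, hp, hprv i0 a hP0, if_pos (by omega)]
        · rw [if_neg hi00, hget' (i-1), if_pos (by omega), hpval (by omega),
            show i - 1 = i0 - 1 from by omega,
            List.getElem?_eq_getElem (by omega : i0 - 1 < P.length)]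
          simp only [Option.map_some, Option.getD_some]
      · -- i > i0 : untouched element of the tail
        have hcne : ∀ (h2 : i0 + 2 < P.length), c ≠ P[i0+2]'h2 := by
          intro h2 h
          have h' : P[i0+2]? = some c := by rw [List.getElem?_eq_getElem h2, h]
          have := hidx_inj (i+2) (i0+2) c hc h'
          omega
        have hlhs : (if q < (n : Int) then PySem.List.pySetD prv q p else prv).getD c 0 =
            prv.getD c 0 := by
          by_cases hq0 : q < (n : Int)
          · have h2 := hqlt.mp hq0
            rw [if_pos hq0, hqval h2, PySem.List.pySetD_natCast,
              getD_set_ne _ _ _ _ _ (hcne h2)]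
          · rw [if_neg hq0]
        rw [hlhs, hprv (i+2) c hc, if_neg (by omega : ¬ i + 2 = 0),
          if_neg (by omega : ¬ i = 0), hget' (i-1), if_neg (by omega),
          show i - 1 + 2 = i + 2 - 1 from by omega]
  · -- pending sorted
    split
    · exact pairwise_insortB _ (List.pairwise_cons.mp hpend).2
    · exact (List.pairwise_cons.mp hpend).2
  · -- pending shape
    intro x hx
    by_cases hcond : p ≥ 0 ∧ q < (n : Int)
    · rw [if_pos hcond] at hx
      rcases mem_insortB.mp hx with rfl | hxr
      · have h0 : 0 < i0 := hpge0.mp hcond.1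
        have h2 : i0 + 2 < P.length := hqlt.mp hcond.2
        refine ⟨P[i0-1]'(by omega), P[i0+2]'h2, ?_, ?_, ?_⟩
        · rw [hpval h0, hqval h2, PySem.List.pyGetD_natCast, PySem.List.pyGetD_natCast]
        · exact hPlt (i0-1) (i0+2) (by omega) h2 (by omega)
        · exact hPn _ (List.getElem_mem h2)
      · exact hshape x (List.mem_cons_of_mem _ hxr)
    · rw [if_neg hcond] at hx
      exact hshape x (List.mem_cons_of_mem _ hx)
  · -- completeness
    intro i c c' h1' h2'
    rw [hget' i] at h1'
    rw [hget' (i+1)] at h2'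
    have hmemrest : ∀ (hP : (vals.getD c' 0 - vals.getD c 0, (c : Int), (c' : Int)) ∈ rest),
        (vals.getD c' 0 - vals.getD c 0, (c : Int), (c' : Int)) ∈
          (if p ≥ 0 ∧ q < (n : Int) then
            insortB rest (PySem.List.pyGetD vals q 0 - PySem.List.pyGetD vals p 0, p, q)
          else rest) := by
      intro hP
      split
      · exact mem_insortB.mpr (Or.inr hP)
      · exact hP
    by_cases hilt : i < i0
    · rw [if_pos hilt] at h1'
      by_cases h1lt : i + 1 < i0
      · -- an untouched gap strictly before the removed pair
        rw [if_pos h1lt] at h2'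
        have hold := hcomp i c c' h1' h2'
        have hne : c ≠ a := by
          intro h; subst h; have := hidx_inj i i0 c h1' hP0; omega
        rcases List.mem_cons.mp hold with heq | hrest
        · exfalso
          rw [Prod.mk.injEq, Prod.mk.injEq] at heq
          exact hne (by exact_mod_cast heq.2.1)
        · exact hmemrest hrest
      · -- the merged gap (P[i0-1], P[i0+2])
        rw [if_neg h1lt] at h2'
        have hieq : i + 1 = i0 := by omega
        have hc1 : P[i0-1]? = some c := by rw [show i0 - 1 = i from by omega]; exact h1'
        have hc2 : P[i0+2]? = some c' := by rw [show i0 + 2 = i + 1 + 2 from by omega]; exact h2'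
        have h2len : i0 + 2 < P.length := (List.getElem?_eq_some_iff.mp hc2).1
        have h0 : 0 < i0 := by omega
        have hcond : p ≥ 0 ∧ q < (n : Int) := ⟨hpge0.mpr h0, hqlt.mpr h2len⟩
        rw [if_pos hcond]
        apply mem_insortB.mpr
        left
        have hpc : p = (c : Int) := by
          rw [hpval h0]
          congr 1
          exact (List.getElem?_eq_some_iff.mp hc1).2
        have hqc : q = (c' : Int) := by
          rw [hqval h2len]
          congr 1
          exact (List.getElem?_eq_some_iff.mp hc2).2
        rw [hpc, hqc, PySem.List.pyGetD_natCast, PySem.List.pyGetD_natCast]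
    · -- an untouched gap strictly after the removed pair
      rw [if_neg hilt] at h1'
      rw [if_neg (by omega : ¬ i + 1 < i0)] at h2'
      have h2'' : P[(i+2)+1]? = some c' := by
        rw [show (i+2)+1 = i + 1 + 2 from by omega]; exact h2'
      have hold := hcomp (i+2) c c' h1' h2''
      have hne : c ≠ a := by
        intro h; subst h; have := hidx_inj (i+2) i0 c h1' hP0; omega
      rcases List.mem_cons.mp hold with heq | hrest
      · exfalso
        rw [Prod.mk.injEq, Prod.mk.injEq] at heq
        exact hne (by exact_mod_cast heq.2.1)
      · exact hmemrest hrest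

-- a stale entry is skipped: the invariant survives with the same P
theorem stale_inv (vals idx : List Int) (n : Nat) (e : Int × Int × Int)
    (rest : List (Int × Int × Int)) (alive : List Bool) (prv nxt : List Int) (P : List Nat)
    (hinv : StInv vals idx n (e :: rest) alive prv nxt P)
    (hg : ¬ (PySem.List.pyGetD alive e.2.1 false && PySem.List.pyGetD alive e.2.2 false &&
      (PySem.List.pyGetD nxt e.2.1 0 == e.2.2)) = true) :
    StInv vals idx n rest alive prv nxt P := by
  obtain ⟨hal, hpl, hnl, hmono, hPn, halive, hnxt, hprv, hpend, hshape, hcomp⟩ := hinv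
  refine ⟨hal, hpl, hnl, hmono, hPn, halive, hnxt, hprv,
    (List.pairwise_cons.mp hpend).2,
    fun x hx => hshape x (List.mem_cons_of_mem _ hx), ?_⟩
  intro i c c' h1' h2'
  have hold := hcomp i c c' h1' h2'
  rcases List.mem_cons.mp hold with heq | hrest
  · -- e would then be a live adjacent gap, contradicting the failed guard
    exfalso
    apply hg
    rw [← heq]
    have hcn : c < n := hPn c (List.mem_iff_getElem?.mpr ⟨i, h1'⟩)
    have hcn' : c' < n := hPn c' (List.mem_iff_getElem?.mpr ⟨i+1, h2'⟩)
    simp only [PySem.List.pyGetD_natCast, Bool.and_eq_true, beq_iff_eq]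
    refine ⟨⟨?_, ?_⟩, ?_⟩
    · rw [halive c hcn]
      simp [List.mem_iff_getElem?.mpr ⟨i, h1'⟩]
    · rw [halive c' hcn']
      simp [List.mem_iff_getElem?.mpr ⟨i+1, h2'⟩]
    · rw [hnxt i c h1', h2']
      simp
  · exact hrest

-- when the queue is empty no adjacent pair is left, so A's loop is finished too
theorem empty_case {vals idx : List Int} {n : Nat} {alive : List Bool} {prv nxt : List Int}
    {P : List Nat} (hinv : StInv vals idx n [] alive prv nxt P) (sol : List (List Int)) :
    loopA (P.map (fA vals idx)) sol = sol := by
  obtain ⟨-, -, -, -, -, -, -, -, -, -, hcomp⟩ := hinv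
  apply loopA_short
  rw [List.length_map]
  intro hlen
  have h0 : P[0]? = some P[0] := List.getElem?_eq_getElem (by omega)
  have h1 : P[1]? = some P[1] := List.getElem?_eq_getElem (by omega)
  exact absurd (hcomp 0 P[0] P[1] h0 h1) (List.not_mem_nil)

-- one round of B's loop simulates one round of A's loop
theorem loopB_sim (m : Nat) : ∀ (vals idx : List Int) (n : Nat)
    (pending : List (Int × Int × Int)) (alive : List Bool) (prv nxt : List Int)
    (P : List Nat) (sol : List (List Int)),
    pending.length + 2 * alive.count true ≤ m →
    StInv vals idx n pending alive prv nxt P →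
    loopB vals idx (n : Int) pending alive prv nxt sol = loopA (P.map (fA vals idx)) sol := by
  induction m with
  | zero =>
    intro vals idx n pending alive prv nxt P sol hm hinv
    have hpend0 : pending = [] := List.eq_nil_of_length_eq_zero (by omega)
    subst hpend0
    rw [loopB]
    exact (empty_case hinv sol).symm
  | succ m ih =>
    intro vals idx n pending alive prv nxt P sol hm hinv
    rcases pending with _ | ⟨⟨d, l, r⟩, rest⟩
    · rw [loopB]
      exact (empty_case hinv sol).symm
    · obtain ⟨a, b, he, hab, hbn⟩ := hinv.2.2.2.2.2.2.2.2.2.1 _ (List.mem_cons_self)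
      rw [Prod.mk.injEq, Prod.mk.injEq] at he
      obtain ⟨rfl, rfl, rfl⟩ := he
      obtain ⟨hal, hpl, hnl, hmono, hPn, halive, hnxt, hprv, hpend, hshape, hcomp⟩ := hinv
      rw [loopB]
      by_cases hguard : (PySem.List.pyGetD alive ((a : Nat) : Int) false &&
          PySem.List.pyGetD alive ((b : Nat) : Int) false &&
          (PySem.List.pyGetD nxt ((a : Nat) : Int) 0 == ((b : Nat) : Int))) = true
      · rw [dif_pos hguard]
        have hguard' := hguard
        simp only [PySem.List.pyGetD_natCast, Bool.and_eq_true, beq_iff_eq] at hguard'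
        obtain ⟨⟨hga, hgb⟩, hgn⟩ := hguard'
        have han : a < n := by omega
        have hmemA : a ∈ P := by
          have := halive a han
          rw [hga] at this
          exact of_decide_eq_true this.symm
        obtain ⟨i0, hP0⟩ := List.mem_iff_getElem?.mp hmemA
        have hP1 : P[i0+1]? = some b := by
          have hn := hnxt i0 a hP0
          rw [hgn] at hn
          rcases hP1' : P[i0+1]? with _ | c
          · rw [hP1'] at hn
            simp only [Option.map_none, Option.getD_none] at hn
            have : b = n := by exact_mod_cast hn
            omega
          · rw [hP1'] at hn
            simp only [Option.map_some, Option.getD_some] at hn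
            have : b = c := by exact_mod_cast hn
            subst this
            rfl
        have hi1 : i0 + 1 < P.length := (List.getElem?_eq_some_iff.mp hP1).1
        have haP : P[i0] = a := (List.getElem?_eq_some_iff.mp hP0).2
        have hbP : P[i0+1] = b := (List.getElem?_eq_some_iff.mp hP1).2
        have hPlt : ∀ (j k : Nat) (hj : j < P.length) (hk : k < P.length), j < k → P[j] < P[k] :=
          fun j k hj hk hjk => List.pairwise_iff_getElem.mp hmono j k hj hk hjk
        -- A-side data
        have hlenA : (P.map (fA vals idx)).length = P.length := by simp
        have hxsgetD : ∀ (t : Nat) (ht : t < P.length),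
            (P.map (fA vals idx)).getD t (0, 0) = fA vals idx (P[t]'ht) := by
          intro t ht
          rw [List.getD_eq_getElem?_getD, List.getElem?_map, List.getElem?_eq_getElem ht]
          rfl
        have hgap : ∀ (t : Nat) (ht : t + 1 < P.length),
            gapF (P.map (fA vals idx)) t =
              vals.getD (P[t+1]'ht) 0 - vals.getD (P[t]'(Nat.lt_of_succ_lt ht)) 0 := by
          intro t ht
          rw [gapF, hxsgetD t (by omega), hxsgetD (t+1) ht]
          rfl
        have hminall : ∀ x ∈ ((vals.getD b 0 - vals.getD a 0, (a : Int), (b : Int)) :: rest),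
            Le3 (vals.getD b 0 - vals.getD a 0, (a : Int), (b : Int)) x := by
          intro x hx
          rcases List.mem_cons.mp hx with rfl | hx'
          · exact Lt3_irrefl _
          · exact (List.pairwise_cons.mp hpend).1 x hx'
        have hgapmem : ∀ (t : Nat) (ht : t + 1 < P.length),
            (vals.getD (P[t+1]'ht) 0 - vals.getD (P[t]'(by omega)) 0,
              ((P[t]'(by omega) : Nat) : Int), ((P[t+1]'ht : Nat) : Int)) ∈
              ((vals.getD b 0 - vals.getD a 0, (a : Int), (b : Int)) :: rest) := by
          intro t ht
          exact hcomp t _ _ (List.getElem?_eq_getElem (by omega)) (List.getElem?_eq_getElem ht)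
        have hgapi0 : gapF (P.map (fA vals idx)) i0 = vals.getD b 0 - vals.getD a 0 := by
          rw [hgap i0 hi1, haP, hbP]
        have hmin : ∀ (t : Nat), t + 1 < (P.map (fA vals idx)).length →
            gapF (P.map (fA vals idx)) i0 ≤ gapF (P.map (fA vals idx)) t := by
          intro t ht
          rw [hlenA] at ht
          have hle := hminall _ (hgapmem t ht)
          simp only [Le3, Lt3, not_or, not_and, not_lt] at hle
          rw [hgapi0, hgap t ht]
          exact hle.1
        have hfirst : ∀ (t : Nat), t < i0 →
            gapF (P.map (fA vals idx)) i0 < gapF (P.map (fA vals idx)) t := by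
          intro t ht
          have ht1 : t + 1 < P.length := by omega
          have hle := hminall _ (hgapmem t ht1)
          have hPta : P[t]'(by omega) < a := by
            rw [← haP]; exact hPlt t i0 (by omega) (by omega) ht
          simp only [Le3, Lt3, not_or, not_and, not_lt] at hle
          rw [hgapi0, hgap t ht1]
          rcases lt_or_eq_of_le hle.1 with h | h
          · exact h
          · exfalso
            have := hle.2 h.symm
            have hcast : ((P[t]'(by omega) : Nat) : Int) < (a : Int) := by exact_mod_cast hPta
            omega
        have hscan := scanA_eq (P.map (fA vals idx)) i0 (by omega) hmin hfirst
        -- unfold A one round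
        rw [loopA, dif_pos (by rw [hlenA]; omega : 1 < (P.map (fA vals idx)).length), hscan]
        dsimp only
        have hpop1 : PySem.List.pop? (P.map (fA vals idx)) ((i0 : Int) + 1) =
            some ((P.map (fA vals idx))[i0+1]'(by rw [hlenA]; omega),
              (P.map (fA vals idx)).eraseIdx (i0+1)) := by
          rw [show ((i0 : Int) + 1) = ((i0 + 1 : Nat) : Int) from by push_cast; ring]
          exact PySem.List.pop?_natCast _ _ (by rw [hlenA]; omega)
        rw [hpop1]
        dsimp only
        have hlen2 : ((P.map (fA vals idx)).eraseIdx (i0+1)).length = P.length - 1 := by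
          rw [List.length_eraseIdx]
          rw [hlenA]
          simp [hi1]
        have hpop2 : PySem.List.pop? ((P.map (fA vals idx)).eraseIdx (i0+1)) ((i0 : Int)) =
            some (((P.map (fA vals idx)).eraseIdx (i0+1))[i0]'(by omega),
              ((P.map (fA vals idx)).eraseIdx (i0+1)).eraseIdx i0) := by
          exact PySem.List.pop?_natCast _ _ (by omega)
        rw [hpop2]
        dsimp only
        -- the two appended pairs coincide
        have hpairA : (PySem.List.pyGetD (P.map (fA vals idx)) ((i0 : Int)) (0, 0)).2 =
            idx.getD a 0 := by
          rw [PySem.List.pyGetD_natCast, hxsgetD i0 (by omega), haP]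
          rfl
        have hpairA' : (PySem.List.pyGetD (P.map (fA vals idx)) ((i0 : Int) + 1) (0, 0)).2 =
            idx.getD b 0 := by
          rw [show ((i0 : Int) + 1) = ((i0 + 1 : Nat) : Int) from by push_cast; ring,
            PySem.List.pyGetD_natCast, hxsgetD (i0+1) hi1, hbP]
          rfl
        rw [hpairA, hpairA']
        -- the remaining list is P' mapped
        have herase : ((P.map (fA vals idx)).eraseIdx (i0+1)).eraseIdx i0 =
            (P.take i0 ++ P.drop (i0+2)).map (fA vals idx) := by
          rw [List.eraseIdx_map, List.eraseIdx_map, erase2_eq P i0 hi1]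
        rw [herase]
        -- B side: one step of the invariant + induction hypothesis
        have hstep := step_inv vals idx n rest alive prv nxt P a b i0
          (PySem.List.pyGetD prv ((a : Nat) : Int) 0) (PySem.List.pyGetD nxt ((b : Nat) : Int) 0)
          ⟨hal, hpl, hnl, hmono, hPn, halive, hnxt, hprv, hpend, hshape, hcomp⟩
          hP0 hP1 (PySem.List.pyGetD_natCast _ _ _) (PySem.List.pyGetD_natCast _ _ _)
        have hcount : (PySem.List.pySetD (PySem.List.pySetD alive ((a : Nat) : Int) false)
            ((b : Nat) : Int) false).count true < alive.count true := by
          have h1 := pv_count_pySetD_false_lt alive ((a : Nat) : Int)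
            (by rw [PySem.List.pyGetD_natCast]; exact hga)
          have h2 := pv_count_pySetD_false_le (PySem.List.pySetD alive ((a : Nat) : Int) false)
            ((b : Nat) : Int)
          omega
        have hplen : (if PySem.List.pyGetD prv ((a : Nat) : Int) 0 ≥ 0 ∧
              PySem.List.pyGetD nxt ((b : Nat) : Int) 0 < (n : Int) then
            insortB rest (PySem.List.pyGetD vals (PySem.List.pyGetD nxt ((b : Nat) : Int) 0) 0 -
              PySem.List.pyGetD vals (PySem.List.pyGetD prv ((a : Nat) : Int) 0) 0,
              PySem.List.pyGetD prv ((a : Nat) : Int) 0,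
              PySem.List.pyGetD nxt ((b : Nat) : Int) 0)
          else rest).length ≤ rest.length + 1 := by
          split
          · rw [insortB, PySem.List.length_insert]
          · omega
        rw [PySem.List.pyGetD_natCast idx a 0, PySem.List.pyGetD_natCast idx b 0]
        exact ih vals idx n _ _ _ _ _ _
          (by simp only [List.length_cons] at hm; omega) hstep
      · rw [dif_neg hguard]
        exact ih vals idx n rest alive prv nxt P sol
          (by simp only [List.length_cons] at hm; omega)
          (stale_inv vals idx n _ rest alive prv nxt P
            ⟨hal, hpl, hnl, hmono, hPn, halive, hnxt, hprv, hpend, hshape, hcomp⟩ hguard)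

-- ---- the initial state satisfies the invariant ----
theorem init_events_spec (vals : List Int) (n : Nat) (hn : vals.length = n) :
    ((PySem.List.pyRange 0 ((n : Int) - 1) 1).foldl
      (fun ev j => insortB ev
        (PySem.List.pyGetD vals (j + 1) 0 - PySem.List.pyGetD vals j 0, j, j + 1)) []).Pairwise Le3 ∧
    (∀ e, e ∈ (PySem.List.pyRange 0 ((n : Int) - 1) 1).foldl
      (fun ev j => insortB ev
        (PySem.List.pyGetD vals (j + 1) 0 - PySem.List.pyGetD vals j 0, j, j + 1)) [] ↔
      ∃ j : Nat, j + 1 < n ∧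
        e = (vals.getD (j+1) 0 - vals.getD j 0, (j : Int), ((j : Int) + 1))) := by
  have aux : ∀ m : Nat,
      ((PySem.List.pyRange 0 (m : Int) 1).foldl
        (fun ev j => insortB ev
          (PySem.List.pyGetD vals (j + 1) 0 - PySem.List.pyGetD vals j 0, j, j + 1)) []).Pairwise Le3 ∧
      (∀ e, e ∈ (PySem.List.pyRange 0 (m : Int) 1).foldl
        (fun ev j => insortB ev
          (PySem.List.pyGetD vals (j + 1) 0 - PySem.List.pyGetD vals j 0, j, j + 1)) [] ↔
        ∃ j : Nat, j < m ∧
          e = (vals.getD (j+1) 0 - vals.getD j 0, (j : Int), ((j : Int) + 1))) := by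
    intro m
    induction m with
    | zero =>
      rw [show ((0 : Nat) : Int) = 0 by norm_num, PySem.List.pyRange_one_eq_nil le_rfl]
      simp
    | succ m ihm =>
      obtain ⟨ihp, ihmem⟩ := ihm
      have hsucc : ((m + 1 : Nat) : Int) = (m : Int) + 1 := by push_cast; ring
      rw [hsucc, PySem.List.pyRange_one_succ_right (by positivity), List.foldl_append]
      simp only [List.foldl_cons, List.foldl_nil]
      have hcast1 : ((m : Int) + 1) = ((m + 1 : Nat) : Int) := by push_cast; ring
      rw [hcast1, PySem.List.pyGetD_natCast, PySem.List.pyGetD_natCast]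
      constructor
      · exact pairwise_insortB _ ihp
      · intro e
        rw [mem_insortB, ihmem]
        constructor
        · rintro (rfl | ⟨j, hj, rfl⟩)
          · exact ⟨m, by omega, by rw [hcast1]⟩
          · exact ⟨j, by omega, rfl⟩
        · rintro ⟨j, hj, rfl⟩
          rcases Nat.lt_or_ge j m with h | h
          · exact Or.inr ⟨j, h, rfl⟩
          · have : j = m := by omega
            subst this
            left; rw [hcast1]
  rcases Nat.eq_zero_or_pos n with rfl | hn0
  · rw [show ((0 : Nat) : Int) - 1 = -1 by norm_num, PySem.List.pyRange_one_eq_nil (by norm_num)]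
    simp only [List.foldl_nil]
    constructor
    · exact List.Pairwise.nil
    · intro e
      simp only [List.not_mem_nil, false_iff]
      rintro ⟨j, hj, -⟩
      omega
  · have hcast : ((n : Nat) : Int) - 1 = ((n - 1 : Nat) : Int) := by omega
    rw [hcast]
    obtain ⟨hp, hmem⟩ := aux (n - 1)
    refine ⟨hp, fun e => ?_⟩
    rw [hmem]
    constructor
    · rintro ⟨j, hj, rfl⟩; exact ⟨j, by omega, rfl⟩
    · rintro ⟨j, hj, rfl⟩; exact ⟨j, by omega, rfl⟩

theorem initial_inv (vals idx : List Int) (n : Nat) (hv : vals.length = n) (hidx : idx.length = n) :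
    StInv vals idx n
      ((PySem.List.pyRange 0 ((n : Int) - 1) 1).foldl
        (fun ev j => insortB ev
          (PySem.List.pyGetD vals (j + 1) 0 - PySem.List.pyGetD vals j 0, j, j + 1)) [])
      (PySem.List.pyRepeat [true] (n : Int))
      ((PySem.List.pyRange 0 (n : Int) 1).map (fun j => j - 1))
      ((PySem.List.pyRange 0 (n : Int) 1).map (fun j => j + 1))
      (List.range n) := by
  obtain ⟨hpair, hmem⟩ := init_events_spec vals n hv
  have halive : PySem.List.pyRepeat [true] (n : Int) = List.replicate n true := by
    rw [PySem.List.pyRepeat_singleton, Int.toNat_natCast]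
  have hgetrange : ∀ (c : Int) (a : Nat), a < n →
      ((PySem.List.pyRange 0 (n : Int) 1).map (fun j => j + c)).getD a 0 = (a : Int) + c := by
    intro c a ha
    rw [List.getD_eq_getElem?_getD, List.getElem?_map, PySem.List.getElem?_pyRange_one]
    simp only [sub_zero, Int.toNat_natCast, ha, if_true]
    simp
  refine ⟨?_, ?_, ?_, List.pairwise_lt_range, ?_, ?_, ?_, ?_, hpair, ?_, ?_⟩
  · rw [halive, List.length_replicate]
  · rw [List.length_map, PySem.List.length_pyRange_one]; simp
  · rw [List.length_map, PySem.List.length_pyRange_one]; simp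
  · intro p hp; exact List.mem_range.mp hp
  · intro j hj
    rw [halive, List.getD_eq_getElem?_getD, List.getElem?_replicate]
    simp [hj, List.mem_range]
  · intro i a hia
    have hi : i < n := by
      by_contra hcon
      rw [List.getElem?_eq_none_iff.mpr (by simpa using hcon)] at hia
      simp at hia
    have ha : a = i := by
      rw [List.getElem?_range hi] at hia
      exact (Option.some.injEq _ _).mp hia.symm
    subst ha
    have : ((PySem.List.pyRange 0 (n : Int) 1).map (fun j => j + 1)).getD a 0 = (a : Int) + 1 :=
      hgetrange 1 a hi
    rw [this]
    rcases Nat.lt_or_ge (a + 1) n with h | h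
    · rw [List.getElem?_range h]
      simp
    · rw [List.getElem?_eq_none_iff.mpr (by simpa using h)]
      simp only [Option.map_none, Option.getD_none]
      have : a + 1 = n := by omega
      omega
  · intro i a hia
    have hi : i < n := by
      by_contra hcon
      rw [List.getElem?_eq_none_iff.mpr (by simpa using hcon)] at hia
      simp at hia
    have ha : a = i := by
      rw [List.getElem?_range hi] at hia
      exact (Option.some.injEq _ _).mp hia.symm
    subst ha
    have hg : ((PySem.List.pyRange 0 (n : Int) 1).map (fun j => j - 1)).getD a 0 = (a : Int) + (-1) :=
      hgetrange (-1) a hi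
    rcases Nat.eq_zero_or_pos a with rfl | hipos
    · simp only [if_true]
      rw [hg]; norm_num
    · rw [hg]
      have hne : ¬ a = 0 := by omega
      rw [if_neg hne, List.getElem?_range (by omega)]
      simp
      omega
  · intro e he
    obtain ⟨j, hj, rfl⟩ := (hmem e).mp he
    refine ⟨j, j + 1, ?_, by omega, by omega⟩
    simp
  · intro i a b hia hib
    have hi : i < n := by
      by_contra hcon
      rw [List.getElem?_eq_none_iff.mpr (by simpa using hcon)] at hia
      simp at hia
    have hi1 : i + 1 < n := by
      by_contra hcon
      rw [List.getElem?_eq_none_iff.mpr (by simpa using hcon)] at hib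
      simp at hib
    rw [List.getElem?_range hi] at hia
    rw [List.getElem?_range hi1] at hib
    obtain rfl : a = i := (Option.some.injEq _ _).mp hia.symm
    obtain rfl : b = a + 1 := (Option.some.injEq _ _).mp hib.symm
    rw [hmem]
    exact ⟨a, hi1, by simp⟩


-- ===== VERDICT (by name: the statement is the Claim_ definition above) =====
theorem opponentMatching_spec : Claim_equal_opponentMatching := by
  intro xp _hdom
  unfold Spec_opponentMatching
  unfold opponentMatching opponentMatching_alt
  by_cases h1 : xp.length ≤ 1
  · simp [h1]
  · simp only [h1, if_false]
    show loopA _ [] = _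
    set xpSorted := PySem.List.sorted ((PySem.List.enumerate xp 0).map (fun p => (p.2, p.1)))
      (fun t => t.1) false with hxs
    have hlen : xpSorted.length = xp.length := by
      rw [hxs, PySem.List.length_sorted, List.length_map, PySem.List.length_enumerate]
    have hmap : (List.range xp.length).map
        (fA (xpSorted.map (fun p => p.1)) (xpSorted.map (fun p => p.2))) = xpSorted := by
      apply List.ext_getElem
      · simp [hlen]
      · intro i hi1 hi2
        simp only [List.getElem_map, List.getElem_range, fA]
        have hvg : (xpSorted.map (fun p => p.1)).getD i 0 = xpSorted[i].1 := by
          rw [List.getD_eq_getElem?_getD, List.getElem?_map, List.getElem?_eq_getElem hi2]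
          rfl
        have hig : (xpSorted.map (fun p => p.2)).getD i 0 = xpSorted[i].2 := by
          rw [List.getD_eq_getElem?_getD, List.getElem?_map, List.getElem?_eq_getElem hi2]
          rfl
        rw [hvg, hig]
    refine ((loopB_sim _ _ _ _ _ _ _ _ (List.range xp.length) [] le_rfl
      (initial_inv _ _ _ ?_ ?_)).trans ?_).symm
    · rw [List.length_map, hlen]
    · rw [List.length_map, hlen]
    · rw [hmap]
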